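-- pv_equiv track=rewrite | github.com/cinsyiii/wordle | wordle.py | hint_indexes
-- ===== SOURCE A (Python) =====
-- def hint_indexes(answer, guess):
--     '''
--     search for matching characters, provide hint
--     '''
--     answer_chars = list(answer)
--     guess_chars = list(guess)
--     slight_correct = []  # letter is somewhere in the word
--     exact_correct = {}  # exact index as letter in word
--
--     for i in range(len(answer_chars)):
--         for j in range(len(guess_chars)):
--
--             if answer_chars[i] == guess_chars[j]:
--                 if i == j:
--                     exact_correct[guess_chars[j]] = i
--                 else:
--                     slight_correct.append(guess_chars[j])
--
--     return exact_correct, slight_correct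
-- ===== SOURCE B (Python) =====
-- def hint_indexes(answer, guess):
--     '''
--     search for matching characters, provide hint
--     '''
--     answer_chars = list(answer)
--     guess_chars = list(guess)
--     counts = {}
--     for ch in guess_chars:
--         counts[ch] = counts.get(ch, 0) + 1
--     exact_correct = {}
--     for i in range(min(len(answer_chars), len(guess_chars))):
--         if answer_chars[i] == guess_chars[i]:
--             exact_correct[guess_chars[i]] = i
--     slight_correct = []
--     for i, ch in enumerate(answer_chars):
--         c = counts.get(ch, 0)
--         if i < len(guess_chars) and guess_chars[i] == ch:
--             c -= 1
--         slight_correct.extend([ch] * c)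
--     return exact_correct, slight_correct
-- ===== Notes on version B (the rewrite author's own statement) =====
-- stated objective: faster
-- what changed: Replaces A's nested i,j loops over answer x guess by a guess-letter frequency table plus two linear passes: one diagonal pass for exact matches and one pass over the answer emitting count-minus-diagonal copies per letter.
import Mathlib
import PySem

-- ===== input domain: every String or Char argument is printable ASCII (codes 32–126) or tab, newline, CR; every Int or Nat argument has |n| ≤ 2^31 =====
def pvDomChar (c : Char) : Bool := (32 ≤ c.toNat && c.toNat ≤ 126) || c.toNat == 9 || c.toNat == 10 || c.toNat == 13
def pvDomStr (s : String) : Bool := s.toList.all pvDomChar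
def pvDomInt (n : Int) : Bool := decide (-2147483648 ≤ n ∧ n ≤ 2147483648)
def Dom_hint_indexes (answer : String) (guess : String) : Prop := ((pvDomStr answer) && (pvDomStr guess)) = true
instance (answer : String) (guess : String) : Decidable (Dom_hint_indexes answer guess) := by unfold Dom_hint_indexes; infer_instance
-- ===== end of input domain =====

-- B replaces A's quadratic nested index loops by a letter-frequency table plus two linear passes (one diagonal pass
-- for exact matches, one pass over the answer for misplaced letters); objective: faster.

-- ===== PORT A =====
-- nested 'for i in range(len(answer_chars)): for j in range(len(guess_chars)):' over a (dict, list) state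
def hint_indexes (answer : String) (guess : String) : (List (String × Int)) × List String :=
  let answer_chars : List String := answer.toList.map (fun c => String.mk [c])
  let guess_chars : List String := guess.toList.map (fun c => String.mk [c])
  let st :=
    (PySem.List.pyRange 0 (PySem.List.len answer_chars) 1).foldl (fun st i =>
      (PySem.List.pyRange 0 (PySem.List.len guess_chars) 1).foldl
        (fun (st : PySem.Dict String Int × List String) j =>
          if PySem.List.pyGetD answer_chars i "" = PySem.List.pyGetD guess_chars j "" then
            if i = j then (st.1.insert (PySem.List.pyGetD guess_chars j "") i, st.2)
            else (st.1, st.2 ++ [PySem.List.pyGetD guess_chars j ""])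
          else st) st)
      ((PySem.Dict.empty : PySem.Dict String Int), ([] : List String))
  (st.1.items, st.2)

-- ===== PORT B =====
-- counts = frequency dict over guess; one diagonal pass for exact; one pass over enumerate(answer) for slight
def hint_indexes_alt (answer : String) (guess : String) : (List (String × Int)) × List String :=
  let answer_chars : List String := answer.toList.map (fun c => String.mk [c])
  let guess_chars : List String := guess.toList.map (fun c => String.mk [c])
  let counts : PySem.Dict String Int :=
    guess_chars.foldl (fun d ch => d.insert ch (d.getD ch 0 + 1)) PySem.Dict.empty
  let exact_correct : PySem.Dict String Int :=
    (PySem.List.pyRange 0 (min (PySem.List.len answer_chars) (PySem.List.len guess_chars)) 1).foldl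
      (fun d i =>
        if PySem.List.pyGetD answer_chars i "" = PySem.List.pyGetD guess_chars i "" then
          d.insert (PySem.List.pyGetD guess_chars i "") i
        else d) PySem.Dict.empty
  let slight_correct : List String :=
    (PySem.List.enumerate answer_chars 0).foldl (fun s p =>
      let c : Int := counts.getD p.2 0 -
        (if p.1 < PySem.List.len guess_chars ∧ PySem.List.pyGetD guess_chars p.1 "" = p.2 then 1 else 0)
      s ++ List.replicate c.toNat p.2) []
  (exact_correct.items, slight_correct)

-- ===== PRECONDITION & SPEC =====
def Spec_hint_indexes (answer : String) (guess : String) (out : (List (String × Int)) × List String) : Prop := out = hint_indexes_alt answer guess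
instance (answer : String) (guess : String) (out : (List (String × Int)) × List String) : Decidable (Spec_hint_indexes answer guess out) := by unfold Spec_hint_indexes; infer_instance

-- ===== CLAIM (what is proved, stated in full; the proofs are below) =====
def Claim_equal_hint_indexes : Prop := ∀ (answer : String) (guess : String), Dom_hint_indexes answer guess → Spec_hint_indexes answer guess (hint_indexes answer guess)

-- ===== LEMMAS AND PROOFS =====

-- 'there is a diagonal hit for letter a at index i' while scanning gc from position k
def pvHitAt (a : String) (i : Int) (k : Int) (gc : List String) : Bool :=
  match gc with
  | [] => false
  | g :: t => (i == k && g == a) || pvHitAt a i (k + 1) t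

theorem pvHitAt_false_of_lt (a : String) (i : Int) :
    ∀ (gc : List String) (k : Int), i < k → pvHitAt a i k gc = false := by
  intro gc
  induction gc with
  | nil => intro k _; rfl
  | cons g t ih =>
      intro k hk
      simp only [pvHitAt, Bool.or_eq_false_iff, Bool.and_eq_false_iff]
      exact ⟨Or.inl (by simpa using (by omega : i ≠ k)), ih (k + 1) (by omega)⟩

theorem pvHitAt_mem (a : String) (i : Int) :
    ∀ (gc : List String) (k : Int), pvHitAt a i k gc = true → a ∈ gc := by
  intro gc
  induction gc with
  | nil => intro k h; simp [pvHitAt] at h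
  | cons g t ih =>
      intro k h
      simp only [pvHitAt, Bool.or_eq_true, Bool.and_eq_true, beq_iff_eq] at h
      rcases h with ⟨_, rfl⟩ | h
      · exact List.mem_cons_self
      · exact List.mem_cons_of_mem _ (ih (k + 1) h)

theorem pvHitAt_iff (a : String) (i : Int) :
    ∀ (gc : List String) (k : Int),
      pvHitAt a i k gc = true ↔ (k ≤ i ∧ i < k + gc.length ∧ gc[(i - k).toNat]? = some a) := by
  intro gc
  induction gc with
  | nil =>
      intro k
      simp only [pvHitAt, List.length_nil, Nat.cast_zero, add_zero]
      constructor
      · intro h; simp at h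
      · rintro ⟨h1, h2, _⟩; omega
  | cons g t ih =>
      intro k
      simp only [pvHitAt, Bool.or_eq_true, Bool.and_eq_true, beq_iff_eq, ih (k + 1)]
      constructor
      · rintro (⟨rfl, rfl⟩ | ⟨h1, h2, h3⟩)
        · refine ⟨le_refl _, by simp only [List.length_cons]; push_cast; omega, by simp⟩
        · refine ⟨by omega, by simp only [List.length_cons] at h2 ⊢; push_cast at h2 ⊢; omega, ?_⟩
          have : (i - k).toNat = (i - (k + 1)).toNat + 1 := by omega
          rw [this]; simpa using h3
      · rintro ⟨h1, h2, h3⟩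
        by_cases hik : i = k
        · subst hik
          simp at h3
          exact Or.inl ⟨rfl, h3⟩
        · right
          refine ⟨by omega, by simp only [List.length_cons] at h2 ⊢; push_cast at h2 ⊢; omega, ?_⟩
          have : (i - k).toNat = (i - (k + 1)).toNat + 1 := by omega
          rw [this] at h3; simpa using h3
      
-- A's inner loop over enumerate(guess_chars) in closed form
theorem pv_inner_eq (a : String) (i : Int) :
    ∀ (gc : List String) (k : Int) (d : PySem.Dict String Int) (s : List String),
      (PySem.List.enumerate gc k).foldl
        (fun (st : PySem.Dict String Int × List String) p =>
          if a = p.2 then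
            if i = p.1 then (st.1.insert p.2 i, st.2)
            else (st.1, st.2 ++ [p.2])
          else st) (d, s)
      = ((if pvHitAt a i k gc then d.insert a i else d),
         s ++ List.replicate (gc.count a - (if pvHitAt a i k gc then 1 else 0)) a) := by
  intro gc
  induction gc with
  | nil => intro k d s; simp [PySem.List.enumerate, pvHitAt]
  | cons g t ih =>
      intro k d s
      rw [PySem.List.enumerate_cons, List.foldl_cons]
      by_cases hag : a = g
      · subst hag
        by_cases hik : i = k
        · subst hik
          have ht : pvHitAt a i (i + 1) t = false := pvHitAt_false_of_lt a i t (i + 1) (by omega)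
          have hh : pvHitAt a i i (a :: t) = true := by simp [pvHitAt]
          rw [if_pos rfl, if_pos rfl, ih, ht, hh]
          simp
        · have hh : pvHitAt a i k (a :: t) = pvHitAt a i (k + 1) t := by
            simp [pvHitAt, hik]
          rw [if_pos rfl, if_neg hik, ih, hh, List.count_cons_self]
          by_cases hht : pvHitAt a i (k + 1) t = true
          · have hcnt : 1 ≤ List.count a t :=
              List.count_pos_iff.mpr (pvHitAt_mem a i t (k + 1) hht)
            rw [hht]
            simp only [if_true]
            have h1 : List.count a t + 1 - 1 = List.count a t := by omega
            have h2 : List.count a t - 1 + 1 = List.count a t := by omega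
            rw [h1, List.append_assoc, List.singleton_append, ← List.replicate_succ, h2]
          · rw [Bool.not_eq_true] at hht
            rw [hht]
            simp only [Bool.false_eq_true, if_false, Nat.sub_zero]
            rw [List.append_assoc, List.singleton_append, ← List.replicate_succ]
      · have hga : (g == a) = false := by
          simp only [beq_eq_false_iff_ne, ne_eq]
          intro h; exact hag h.symm
        have hh : pvHitAt a i k (g :: t) = pvHitAt a i (k + 1) t := by
          simp [pvHitAt, hga]
        rw [if_neg hag, ih, hh,
          show List.count a (g :: t) = List.count a t from by simp [List.count_cons, hga]]

-- the diagonal condition of B equals pvHitAt for nonnegative i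
theorem pv_cond_iff (a : String) (i : Int) (gc : List String) (hi : 0 ≤ i) :
    (i < PySem.List.len gc ∧ PySem.List.pyGetD gc i "" = a) ↔ pvHitAt a i 0 gc = true := by
  rw [pvHitAt_iff]
  constructor
  · rintro ⟨h1, h2⟩
    have hlen : i < (gc.length : Int) := by simpa [PySem.List.len] using h1
    have hnat : i.toNat < gc.length := by omega
    rw [PySem.List.pyGetD_eq_getElem gc "" hi hlen] at h2
    exact ⟨hi, by omega, by simpa [List.getElem?_eq_getElem hnat] using h2⟩
  · rintro ⟨h1, h2, h3⟩
    simp only [Int.sub_zero] at h3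
    have hnat : i.toNat < gc.length := by
      by_contra hc
      rw [List.getElem?_eq_none (by omega)] at h3
      simp at h3
    have hlen : i < (gc.length : Int) := by omega
    rw [List.getElem?_eq_getElem hnat, Option.some.injEq] at h3
    refine ⟨by simpa [PySem.List.len] using hlen, ?_⟩
    rw [PySem.List.pyGetD_eq_getElem gc "" hi hlen]
    exact h3

theorem pv_foldl_id {A B : Type} : ∀ (l : List B) (init : A), List.foldl (fun d _ => d) init l = init := by
  intro l
  induction l with
  | nil => intro init; rfl
  | cons x t ih => intro init; rw [List.foldl_cons]; exact ih init

-- the main list-level equivalence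
theorem pv_main (ac gc : List String) :
    (let st :=
      (PySem.List.pyRange 0 (PySem.List.len ac) 1).foldl (fun st i =>
        (PySem.List.pyRange 0 (PySem.List.len gc) 1).foldl
          (fun (st : PySem.Dict String Int × List String) j =>
            if PySem.List.pyGetD ac i "" = PySem.List.pyGetD gc j "" then
              if i = j then (st.1.insert (PySem.List.pyGetD gc j "") i, st.2)
              else (st.1, st.2 ++ [PySem.List.pyGetD gc j ""])
            else st) st)
        ((PySem.Dict.empty : PySem.Dict String Int), ([] : List String))
     (st.1.items, st.2))
    =
    (let counts : PySem.Dict String Int :=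
      gc.foldl (fun d ch => d.insert ch (d.getD ch 0 + 1)) PySem.Dict.empty
     let exact_correct : PySem.Dict String Int :=
      (PySem.List.pyRange 0 (min (PySem.List.len ac) (PySem.List.len gc)) 1).foldl
        (fun d i =>
          if PySem.List.pyGetD ac i "" = PySem.List.pyGetD gc i "" then
            d.insert (PySem.List.pyGetD gc i "") i
          else d) PySem.Dict.empty
     let slight_correct : List String :=
      (PySem.List.enumerate ac 0).foldl (fun s p =>
        let c : Int := counts.getD p.2 0 -
          (if p.1 < PySem.List.len gc ∧ PySem.List.pyGetD gc p.1 "" = p.2 then 1 else 0)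
        s ++ List.replicate c.toNat p.2) []
     (exact_correct.items, slight_correct)) := by
  dsimp only
  have hla : PySem.List.len ac = (ac.length : Int) := by simp [PySem.List.len]
  have hlg : PySem.List.len gc = (gc.length : Int) := by simp [PySem.List.len]
  -- A's inner loop in closed form
  have hinner : ∀ (i : Int) (st : PySem.Dict String Int × List String),
      (PySem.List.pyRange 0 (PySem.List.len gc) 1).foldl
        (fun (st : PySem.Dict String Int × List String) j =>
          if PySem.List.pyGetD ac i "" = PySem.List.pyGetD gc j "" then
            if i = j then (st.1.insert (PySem.List.pyGetD gc j "") i, st.2)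
            else (st.1, st.2 ++ [PySem.List.pyGetD gc j ""])
          else st) st
      = ((if pvHitAt (PySem.List.pyGetD ac i "") i 0 gc then st.1.insert (PySem.List.pyGetD ac i "") i else st.1),
         st.2 ++ List.replicate (List.count (PySem.List.pyGetD ac i "") gc -
            (if pvHitAt (PySem.List.pyGetD ac i "") i 0 gc then 1 else 0)) (PySem.List.pyGetD ac i "")) := by
    intro i st
    have hmap : (PySem.List.enumerate gc 0).foldl
        (fun (st : PySem.Dict String Int × List String) p =>
          if PySem.List.pyGetD ac i "" = p.2 then
            if i = p.1 then (st.1.insert p.2 i, st.2)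
            else (st.1, st.2 ++ [p.2])
          else st) (st.1, st.2)
        = (PySem.List.pyRange 0 (PySem.List.len gc) 1).foldl
        (fun (st : PySem.Dict String Int × List String) j =>
          if PySem.List.pyGetD ac i "" = PySem.List.pyGetD gc j "" then
            if i = j then (st.1.insert (PySem.List.pyGetD gc j "") i, st.2)
            else (st.1, st.2 ++ [PySem.List.pyGetD gc j ""])
          else st) st := by
      rw [PySem.List.enumerate_eq_map_pyRange gc "", List.foldl_map]
    rw [← hmap, pv_inner_eq (PySem.List.pyGetD ac i "") i gc 0 st.1 st.2]
  rw [PySem.List.foldl_congr_mem (PySem.List.pyRange 0 (PySem.List.len ac) 1) _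
      (fun (st : PySem.Dict String Int × List String) i =>
        ((if pvHitAt (PySem.List.pyGetD ac i "") i 0 gc then st.1.insert (PySem.List.pyGetD ac i "") i else st.1),
         st.2 ++ List.replicate (List.count (PySem.List.pyGetD ac i "") gc -
            (if pvHitAt (PySem.List.pyGetD ac i "") i 0 gc then 1 else 0)) (PySem.List.pyGetD ac i "")))
      _ (fun acc x _ => hinner x acc)]
  have houter : (PySem.List.enumerate ac 0).foldl
      (fun (st : PySem.Dict String Int × List String) p =>
        ((if pvHitAt p.2 p.1 0 gc then st.1.insert p.2 p.1 else st.1),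
         st.2 ++ List.replicate (List.count p.2 gc -
            (if pvHitAt p.2 p.1 0 gc then 1 else 0)) p.2))
      ((PySem.Dict.empty : PySem.Dict String Int), ([] : List String))
      = (PySem.List.pyRange 0 (PySem.List.len ac) 1).foldl
      (fun (st : PySem.Dict String Int × List String) i =>
        ((if pvHitAt (PySem.List.pyGetD ac i "") i 0 gc then st.1.insert (PySem.List.pyGetD ac i "") i else st.1),
         st.2 ++ List.replicate (List.count (PySem.List.pyGetD ac i "") gc -
            (if pvHitAt (PySem.List.pyGetD ac i "") i 0 gc then 1 else 0)) (PySem.List.pyGetD ac i "")))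
      ((PySem.Dict.empty : PySem.Dict String Int), ([] : List String)) := by
    rw [PySem.List.enumerate_eq_map_pyRange ac "", List.foldl_map]
  rw [← houter]
  rw [PySem.List.foldl_prod_mk
      (fun (d : PySem.Dict String Int) (p : Int × String) =>
        if pvHitAt p.2 p.1 0 gc then d.insert p.2 p.1 else d)
      (fun (s : List String) (p : Int × String) =>
        s ++ List.replicate (List.count p.2 gc - (if pvHitAt p.2 p.1 0 gc then 1 else 0)) p.2)
      (PySem.List.enumerate ac 0) PySem.Dict.empty []]
  have hp1 : ∀ p ∈ PySem.List.enumerate ac 0, (0 : Int) ≤ p.1 := by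
    intro p hp
    rcases (PySem.List.mem_enumerate_iff ac 0 p).mp hp with ⟨k, hk, rfl⟩
    simp
  dsimp only
  simp only [Prod.mk.injEq]
  constructor
  · -- exact_correct components
    congr 1
    have henum : (PySem.List.enumerate ac 0).foldl
        (fun (d : PySem.Dict String Int) (p : Int × String) =>
          if pvHitAt p.2 p.1 0 gc then d.insert p.2 p.1 else d) PySem.Dict.empty
        = (PySem.List.pyRange 0 (PySem.List.len ac) 1).foldl
        (fun (d : PySem.Dict String Int) i =>
          if pvHitAt (PySem.List.pyGetD ac i "") i 0 gc then d.insert (PySem.List.pyGetD ac i "") i else d)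
        PySem.Dict.empty := by
      rw [PySem.List.enumerate_eq_map_pyRange ac "", List.foldl_map]
    rw [henum]
    have hsplit : PySem.List.pyRange 0 (PySem.List.len ac) 1
        = PySem.List.pyRange 0 (min (PySem.List.len ac) (PySem.List.len gc)) 1
          ++ PySem.List.pyRange (min (PySem.List.len ac) (PySem.List.len gc)) (PySem.List.len ac) 1 := by
      refine PySem.List.pyRange_one_append 0 _ _ ?_ ?_ <;> rw [hla, hlg] <;> omega
    rw [hsplit, List.foldl_append]
    have htail : ∀ (d : PySem.Dict String Int),
        (PySem.List.pyRange (min (PySem.List.len ac) (PySem.List.len gc)) (PySem.List.len ac) 1).foldl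
          (fun (d : PySem.Dict String Int) i =>
            if pvHitAt (PySem.List.pyGetD ac i "") i 0 gc then d.insert (PySem.List.pyGetD ac i "") i else d) d = d := by
      intro d
      rw [PySem.List.foldl_congr_mem _ _ (fun (d : PySem.Dict String Int) _ => d) _ ?_]
      · exact pv_foldl_id _ _
      · intro acc x hx
        rcases (PySem.List.mem_pyRange_one).mp hx with ⟨hx1, hx2⟩
        have hxlg : PySem.List.len gc ≤ x := by rw [hla] at hx2; rw [hlg]; omega
        have hfalse : pvHitAt (PySem.List.pyGetD ac x "") x 0 gc = false := by
          by_contra hc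
          rw [Bool.not_eq_false] at hc
          rcases ((pvHitAt_iff _ x gc 0).mp hc) with ⟨_, hlt, _⟩
          rw [hlg] at hxlg
          omega
        rw [hfalse]
        simp
    rw [htail]
    refine PySem.List.foldl_congr_mem _ _ _ _ ?_
    intro acc x hx
    rcases (PySem.List.mem_pyRange_one).mp hx with ⟨hx1, hx2⟩
    rw [hla, hlg] at hx2
    have hxla : x < (ac.length : Int) := by omega
    have hxlg : x < (gc.length : Int) := by omega
    by_cases h : PySem.List.pyGetD ac x "" = PySem.List.pyGetD gc x ""
    · have hhit : pvHitAt (PySem.List.pyGetD ac x "") x 0 gc = true := by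
        refine (pv_cond_iff _ x gc hx1).mp ⟨by rw [hlg]; omega, h.symm⟩
      rw [hhit, if_pos h]
      simp only [if_true]
      rw [h]
    · have hhit : pvHitAt (PySem.List.pyGetD ac x "") x 0 gc = false := by
        by_contra hc
        rw [Bool.not_eq_false] at hc
        have := ((pv_cond_iff _ x gc hx1).mpr hc).2
        exact h this.symm
      rw [hhit, if_neg h]
      simp
  · -- slight_correct components
    refine (PySem.List.foldl_congr_mem _ _ _ _ ?_).symm
    intro acc p hp
    have hp0 : (0 : Int) ≤ p.1 := hp1 p hp
    rw [PySem.Dict.getD_foldl_insert_add_one gc PySem.Dict.empty p.2]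
    rw [PySem.Dict.getD_empty]
    congr 1
    by_cases hb : pvHitAt p.2 p.1 0 gc = true
    · have hcond : p.1 < PySem.List.len gc ∧ PySem.List.pyGetD gc p.1 "" = p.2 :=
        (pv_cond_iff p.2 p.1 gc hp0).mpr hb
      have hcnt : 1 ≤ List.count p.2 gc :=
        List.count_pos_iff.mpr (pvHitAt_mem p.2 p.1 gc 0 hb)
      rw [if_pos hcond, hb]
      simp only [if_true, zero_add]
      congr 1
      omega
    · have hcond : ¬ (p.1 < PySem.List.len gc ∧ PySem.List.pyGetD gc p.1 "" = p.2) := by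
        intro hc
        exact hb ((pv_cond_iff p.2 p.1 gc hp0).mp hc)
      rw [if_neg hcond, Bool.not_eq_true] at *
      rw [hb]
      simp

-- ===== VERDICT (by name: the statement is the Claim_ definition above) =====
theorem hint_indexes_spec : Claim_equal_hint_indexes := by
  intro answer guess _
  unfold Spec_hint_indexes hint_indexes hint_indexes_alt
  exact pv_main _ _
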